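-- pv_equiv track=rewrite | github.com/bruhmanbot/mjc | mjc-py/listUtils.py | tripletsplit
-- ===== SOURCE A (Python) =====
-- def tripletsplit(list2):
--     # Finds and identifies triplets in a list and returns the triplets in kan, the remaining items in list2
--     kan = []
--     i = 0
--     while i < len(list2):
--         if list2.count(list2[i]) >= 3:
--             tripletNumber = list2[i]
--             for m in range(3):
--                 kan.append(tripletNumber)
--                 list2.remove(tripletNumber)
--             i = 0
--         else:
--             i = i + 1
--     return [kan, list2]
-- ===== SOURCE B (Python) =====
-- def tripletsplit(list2):
--     # Single forward pass: each element's occurrence number r and its value's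
--     # triplet quota q decide whether it starts a triplet or is a leftover.
--     # Mutates list2 in place (list2[:] = leftovers), like the original.
--     kan = []
--     left = []
--     seen = []
--     for x in list2:
--         r = seen.count(x) + 1
--         q = 3 * (list2.count(x) // 3)
--         if r % 3 == 1 and r + 2 <= q:
--             kan += [x, x, x]
--         if r > q:
--             left.append(x)
--         seen.append(x)
--     list2[:] = left
--     return [kan, list2]
-- ===== Notes on version B (the rewrite author's own statement) =====
-- stated objective: alternative
-- what changed: A repeatedly rescans the list, removes three copies of the first value whose count reaches 3 and restarts from index 0; B makes one forward pass, deciding for each element from its running occurrence number and its value's triplet quota (3*(count//3)) whether it starts a triplet or is a leftover, then assigns list2[:] = leftovers.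
import Mathlib
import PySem

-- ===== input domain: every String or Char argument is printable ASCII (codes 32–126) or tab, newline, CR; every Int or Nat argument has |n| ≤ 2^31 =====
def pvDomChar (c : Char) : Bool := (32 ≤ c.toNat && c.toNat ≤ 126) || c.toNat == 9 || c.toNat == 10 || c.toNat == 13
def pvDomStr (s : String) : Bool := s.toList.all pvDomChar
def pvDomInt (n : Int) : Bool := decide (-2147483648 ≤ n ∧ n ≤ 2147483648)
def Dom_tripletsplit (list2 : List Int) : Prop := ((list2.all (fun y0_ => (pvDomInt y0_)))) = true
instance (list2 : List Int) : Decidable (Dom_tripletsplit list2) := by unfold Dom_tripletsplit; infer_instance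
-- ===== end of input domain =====

-- B replaces A's restart-and-remove rescanning loop by a single forward pass driven by each
-- element's occurrence number and its value's triplet quota (alternative decomposition, same
-- return value; like A, B rebinds the argument list's contents to the leftovers in place).


-- ===== PORT A =====
-- list2.remove(v): Python raises ValueError when v is absent; A only calls it with count ≥ 3,
-- so the `.getD l` default is never taken.
def tsRemove (l : List Int) (v : Int) : List Int := (PySem.List.remove? l v).getD l

-- needed by tsLoop's termination proof (the port cites it in decreasing_by)
theorem tsRemove_eq_erase (l : List Int) (v : Int) : tsRemove l v = l.erase v := by
  unfold tsRemove
  by_cases h : v ∈ l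
  · rw [PySem.List.remove?_eq_some_erase l v h]; rfl
  · rw [(PySem.List.remove?_eq_none_iff l v).mpr h, List.erase_of_not_mem h]; rfl

theorem tsRemove_length_le (l : List Int) (v : Int) : (tsRemove l v).length ≤ l.length := by
  rw [tsRemove_eq_erase]; exact List.length_erase_le

-- A's while-loop: index i, in-place removal of three copies and restart at i = 0
def tsLoop (kan : List Int) (l : List Int) (i : Nat) : List Int × List Int :=
  if h : i < l.length then
    if 3 ≤ PySem.List.count l l[i] then
      tsLoop (kan ++ [l[i], l[i], l[i]]) (tsRemove (tsRemove (tsRemove l l[i]) l[i]) l[i]) 0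
    else
      tsLoop kan l (i + 1)
  else
    (kan, l)
termination_by (l.length, l.length - i)
decreasing_by
  · apply Prod.Lex.left
    have hm : l[i] ∈ l := by
      have h3 := ‹3 ≤ PySem.List.count l l[i]›
      rw [PySem.List.count_eq] at h3
      exact List.count_pos_iff.mp (by omega)
    have h1 : (tsRemove l l[i]).length = l.length - 1 := by
      rw [tsRemove_eq_erase]; exact List.length_erase_of_mem hm
    have h2 := tsRemove_length_le (tsRemove l l[i]) l[i]
    have h3 := tsRemove_length_le (tsRemove (tsRemove l l[i]) l[i]) l[i]
    omega
  · apply Prod.Lex.right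
    omega

def tripletsplit (list2 : List Int) : List (List Int) :=
  let r := tsLoop [] list2 0
  [r.1, r.2]

-- ===== PORT B =====
-- B's single for-loop: state (kan, left, seen); r = occurrence number, q = triplet quota
def tsAltLoop (l : List Int) (kan left seen : List Int) : List Int → List Int × List Int
  | [] => (kan, left)
  | x :: rest =>
    let r := PySem.List.count seen x + 1
    let q := 3 * (PySem.List.count l x / 3)
    tsAltLoop l
      (if r % 3 = 1 ∧ r + 2 ≤ q then kan ++ [x, x, x] else kan)
      (if q < r then left ++ [x] else left)
      (seen ++ [x]) rest

def tripletsplit_alt (list2 : List Int) : List (List Int) :=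
  let r := tsAltLoop list2 [] [] [] list2
  [r.1, r.2]

-- ===== PRECONDITION & SPEC =====
def Spec_tripletsplit (list2 : List Int) (out : List (List Int)) : Prop := out = tripletsplit_alt list2
instance (list2 : List Int) (out : List (List Int)) : Decidable (Spec_tripletsplit list2 out) := by unfold Spec_tripletsplit; infer_instance

-- ===== CLAIM (what is proved, stated in full; the proofs are below) =====
def Claim_equal_tripletsplit : Prop := ∀ (list2 : List Int), Dom_tripletsplit list2 → Spec_tripletsplit list2 (tripletsplit list2)

-- ===== LEMMAS AND PROOFS =====

theorem count_app_self (s : List Int) (x : Int) : List.count x (s ++ [x]) = List.count x s + 1 := by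
  simp

theorem count_app_ne (s : List Int) {x y : Int} (h : y ≠ x) :
    List.count y (s ++ [x]) = List.count y s := by
  simp [List.count_append, Ne.symm h]

-- per-element contributions of B's pass: they depend on `seen` only through counts
def contribK (l seen : List Int) (x : Int) : List Int :=
  if (List.count x seen + 1) % 3 = 1 ∧ List.count x seen + 1 + 2 ≤ 3 * (List.count x l / 3)
  then [x, x, x] else []

def contribL (l seen : List Int) (x : Int) : List Int :=
  if 3 * (List.count x l / 3) < List.count x seen + 1 then [x] else []

-- accumulator-free form of B's loop
def go (l : List Int) (seen : List Int) : List Int → List Int × List Int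
  | [] => ([], [])
  | x :: rest =>
    let t := go l (seen ++ [x]) rest
    (contribK l seen x ++ t.1, contribL l seen x ++ t.2)

-- remove the first k occurrences of x (left-to-right), as A's three `.remove` calls do
def eraseK (x : Int) : Nat → List Int → List Int
  | 0, s => s
  | k + 1, s => eraseK x k (s.erase x)

theorem eraseK_nil (x : Int) : ∀ k, eraseK x k [] = [] := by
  intro k
  induction k with
  | zero => rfl
  | succ m ih => rw [eraseK, List.erase_nil]; exact ih

theorem eraseK_cons_ne (x y : Int) (h : y ≠ x) : ∀ k s, eraseK x k (y :: s) = y :: eraseK x k s := by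
  intro k
  induction k with
  | zero => intro s; rfl
  | succ m ih =>
    intro s
    rw [eraseK, List.erase_cons_tail (by simp [h]), ih, eraseK]

theorem tsAltLoop_eq_go (l : List Int) :
    ∀ (rest kan left seen : List Int),
      tsAltLoop l kan left seen rest = (kan ++ (go l seen rest).1, left ++ (go l seen rest).2) := by
  intro rest
  induction rest with
  | nil => intro kan left seen; simp [tsAltLoop, go]
  | cons x r ih =>
    intro kan left seen
    rw [tsAltLoop]
    simp only [go, PySem.List.count_eq]
    rw [ih]
    simp only [contribK, contribL]
    split_ifs <;> simp_all [List.append_assoc]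

theorem go_append (l : List Int) :
    ∀ (a b seen : List Int),
      go l seen (a ++ b) =
        ((go l seen a).1 ++ (go l (seen ++ a) b).1, (go l seen a).2 ++ (go l (seen ++ a) b).2) := by
  intro a
  induction a with
  | nil => intro b seen; simp [go]
  | cons x r ih => intro b seen; simp [go, ih, List.append_assoc]

-- a block whose every element has total count < 3 contributes nothing to kan and all of itself to left
theorem go_small (l : List Int) :
    ∀ (rest seen : List Int), (∀ y ∈ rest, List.count y l < 3) → go l seen rest = ([], rest) := by
  intro rest
  induction rest with
  | nil => intro seen _; simp [go]
  | cons x r ih =>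
    intro seen h
    have hx : List.count x l < 3 := h x (by simp)
    have hq : List.count x l / 3 = 0 := Nat.div_eq_of_lt hx
    simp only [go, ih (seen ++ [x]) (fun y hy => h y (by simp [hy]))]
    simp [contribK, contribL, hq]

-- core removal lemma: with the first three occurrences of x deleted (k of them still pending in s),
-- every surviving element contributes exactly the same, and the pending x's contribute nothing
theorem go_remove (x : Int) (l l' : List Int)
    (hc : 3 ≤ List.count x l)
    (hx : List.count x l' + 3 = List.count x l)
    (hy : ∀ y, y ≠ x → List.count y l' = List.count y l) :
    ∀ (s seen seen' : List Int) (k : Nat), k ≤ 3 →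
      List.count x seen = List.count x seen' + (3 - k) →
      (0 < k → List.count x seen' = 0) →
      (∀ y, y ≠ x → List.count y seen' = List.count y seen) →
      1 ≤ List.count x seen →
      go l seen s = go l' seen' (eraseK x k s) := by
  intro s
  induction s with
  | nil =>
    intro seen seen' k _ _ _ _ _
    rw [eraseK_nil]; simp [go]
  | cons yv s ih =>
    intro seen seen' k hk hcnt hz hoth hone
    by_cases hyx : yv = x
    · rw [hyx]
      rcases Nat.eq_zero_or_pos k with hk0 | hkpos
      · -- k = 0 : all three already removed; this x survives, occurrence number shifted by 3
        subst hk0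
        have e : List.count x seen = List.count x seen' + 3 := by omega
        simp only [eraseK, go]
        have hck : contribK l seen x = contribK l' seen' x := by
          unfold contribK
          rw [e, ← hx]
          split_ifs <;> first | rfl | (exfalso; omega)
        have hcl : contribL l seen x = contribL l' seen' x := by
          unfold contribL
          rw [e, ← hx]
          split_ifs <;> first | rfl | (exfalso; omega)
        have ht := ih (seen ++ [x]) (seen' ++ [x]) 0 (by omega)
          (by rw [count_app_self, count_app_self]; omega)
          (by omega)
          (by intro y hy'; rw [count_app_ne _ hy', count_app_ne _ hy']; exact hoth y hy')
          (by rw [count_app_self]; omega)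
        rw [hck, hcl, ht]; rfl
      · -- k > 0 : this occurrence is one of the removed three; it contributes nothing
        obtain ⟨m, rfl⟩ : ∃ m, k = m + 1 := ⟨k - 1, by omega⟩
        have hz0 : List.count x seen' = 0 := hz hkpos
        simp only [go]
        have hck : contribK l seen x = [] := by
          unfold contribK; rw [if_neg]; omega
        have hcl : contribL l seen x = [] := by
          unfold contribL; rw [if_neg]; omega
        have herase : eraseK x (m + 1) (x :: s) = eraseK x m s := by
          rw [eraseK, List.erase_cons_head]
        rw [herase, hck, hcl]
        have ht := ih (seen ++ [x]) seen' m (by omega)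
          (by rw [count_app_self]; omega)
          (by intro _; exact hz0)
          (by intro y hy'; rw [count_app_ne _ hy']; exact hoth y hy')
          (by rw [count_app_self]; omega)
        rw [ht]; simp
    · -- yv ≠ x : untouched element, identical contribution on both sides
      rw [eraseK_cons_ne x yv hyx]
      simp only [go]
      have hcy : List.count yv seen' = List.count yv seen := hoth yv hyx
      have hly : List.count yv l' = List.count yv l := hy yv hyx
      have hck : contribK l seen yv = contribK l' seen' yv := by
        unfold contribK; rw [hcy, hly]
      have hcl : contribL l seen yv = contribL l' seen' yv := by
        unfold contribL; rw [hcy, hly]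
      have ht := ih (seen ++ [yv]) (seen' ++ [yv]) k hk
        (by rw [count_app_ne _ (Ne.symm hyx), count_app_ne _ (Ne.symm hyx)]; omega)
        (by intro hpos; rw [count_app_ne _ (Ne.symm hyx)]; exact hz hpos)
        (by intro y hy'
            by_cases hyy : y = yv
            · subst hyy; rw [count_app_self, count_app_self]; omega
            · rw [count_app_ne _ hyy, count_app_ne _ hyy]; exact hoth y hy')
        (by rw [count_app_ne _ (Ne.symm hyx)]; omega)
      rw [hck, hcl, ht]

-- elements of a prefix all of whose positions fail A's count test
theorem count_lt_of_mem_take (l : List Int) (i : Nat)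
    (hmin : ∀ j, (hj : j < l.length) → j < i → List.count l[j] l < 3) :
    ∀ y ∈ l.take i, List.count y l < 3 := by
  intro y hy
  obtain ⟨j, hj, hje⟩ := List.getElem_of_mem hy
  have hb : j < i ∧ j < l.length := by simp [List.length_take] at hj; omega
  have hgy : l[j]'hb.2 = y := by rw [← hje]; simp [List.getElem_take]
  exact hgy ▸ hmin j hb.2 hb.1

-- the crux: at the first index whose value has count ≥ 3, A's removal step peels exactly
-- the first triplet off B's answer
theorem go_first (l : List Int) (i : Nat) (h : i < l.length)
    (hq : 3 ≤ List.count l[i] l)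
    (hmin : ∀ j, (hj : j < l.length) → j < i → List.count l[j] l < 3) :
    go l [] l =
      ([l[i], l[i], l[i]] ++ (go (((l.erase l[i]).erase l[i]).erase l[i]) []
          (((l.erase l[i]).erase l[i]).erase l[i])).1,
        (go (((l.erase l[i]).erase l[i]).erase l[i]) []
          (((l.erase l[i]).erase l[i]).erase l[i])).2) := by
  set x := l[i] with hxdef
  set p := l.take i with hpdef
  set s := l.drop (i + 1) with hsdef
  have hlt : ∀ y ∈ p, List.count y l < 3 := count_lt_of_mem_take l i hmin
  have hxp : x ∉ p := fun hxin => absurd hq (by have := hlt x hxin; omega)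
  have hl : l = p ++ x :: s := by
    rw [hpdef, hsdef, hxdef, List.getElem_cons_drop h, List.take_append_drop]
  have herase : ((l.erase x).erase x).erase x = p ++ eraseK x 2 s := by
    conv_lhs => rw [hl]
    rw [List.erase_append_right _ hxp, List.erase_cons_head,
        List.erase_append_right _ hxp, List.erase_append_right _ hxp]
    rfl
  set l' := ((l.erase x).erase x).erase x with hl'def
  have hm1 : x ∈ l := List.count_pos_iff.mp (by omega)
  have e1 := List.count_erase_self (a := x) (l := l)
  have hm2 : x ∈ l.erase x := by rw [← List.count_pos_iff, e1]; omega
  have e2 := List.count_erase_self (a := x) (l := l.erase x)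
  have e3 := List.count_erase_self (a := x) (l := (l.erase x).erase x)
  have hcx : List.count x l' + 3 = List.count x l := by rw [hl'def, e3, e2, e1]; omega
  have hcy : ∀ y, y ≠ x → List.count y l' = List.count y l := by
    intro y hyne
    rw [hl'def, List.count_erase_of_ne hyne, List.count_erase_of_ne hyne,
        List.count_erase_of_ne hyne]
  have hpx : List.count x p = 0 := List.count_eq_zero.mpr hxp
  have hL : go l [] l = ((go l p (x :: s)).1, p ++ (go l p (x :: s)).2) := by
    nth_rewrite 2 [hl]
    rw [go_append l p (x :: s) [], go_small l p [] hlt]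
    simp
  have hcontrK : contribK l p x = [x, x, x] := by
    unfold contribK; rw [hpx, if_pos (by omega)]
  have hcontrL : contribL l p x = [] := by
    unfold contribL; rw [hpx, if_neg (by omega)]
  have hstep : go l p (x :: s) =
      (contribK l p x ++ (go l (p ++ [x]) s).1, contribL l p x ++ (go l (p ++ [x]) s).2) := by
    simp only [go]
  have hrem : go l (p ++ [x]) s = go l' p (eraseK x 2 s) :=
    go_remove x l l' hq hcx hcy s (p ++ [x]) p 2 (by omega)
      (by simp)
      (fun _ => hpx)
      (fun y hyne => by rw [count_app_ne _ hyne])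
      (by rw [count_app_self]; omega)
  have hlt' : ∀ y ∈ p, List.count y l' < 3 := by
    intro y hyp
    have hyne : y ≠ x := fun he => hxp (he ▸ hyp)
    rw [hcy y hyne]; exact hlt y hyp
  have hR : go l' [] l' = ((go l' p (eraseK x 2 s)).1, p ++ (go l' p (eraseK x 2 s)).2) := by
    nth_rewrite 2 [herase]
    rw [go_append l' p (eraseK x 2 s) [], go_small l' p [] hlt']
    simp
  rw [hL, hstep, hcontrK, hcontrL, hrem, hR]
  simp

-- A's loop, run from index i with the prefix known non-qualifying, returns B's answer
theorem tsLoop_eq_go :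
    ∀ (n : Nat) (l : List Int), l.length ≤ n →
    ∀ (d i : Nat), l.length - i ≤ d →
      (∀ j, (hj : j < l.length) → j < i → List.count l[j] l < 3) →
      ∀ kan, tsLoop kan l i = (kan ++ (go l [] l).1, (go l [] l).2) := by
  intro n
  induction n with
  | zero =>
    intro l hn d i _ _ kan
    have : l = [] := List.eq_nil_of_length_eq_zero (by omega)
    subst this
    rw [tsLoop, dif_neg (by simp)]
    simp [go]
  | succ m ihn =>
    intro l hn d
    induction d with
    | zero =>
      intro i hd hmin kan
      rw [tsLoop, dif_neg (by omega)]
      have hall : ∀ y ∈ l, List.count y l < 3 := by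
        intro y hy
        obtain ⟨j, hj, hje⟩ := List.getElem_of_mem hy
        exact hje ▸ hmin j hj (by omega)
      rw [go_small l l [] hall]
      simp
    | succ e ihd =>
      intro i hd hmin kan
      rw [tsLoop]
      by_cases hi : i < l.length
      · rw [dif_pos hi]
        by_cases hcnt : 3 ≤ PySem.List.count l l[i]
        · rw [if_pos hcnt]
          rw [PySem.List.count_eq] at hcnt
          have hm : l[i] ∈ l := List.count_pos_iff.mp (by omega)
          simp only [tsRemove_eq_erase]
          have hlen : (((l.erase l[i]).erase l[i]).erase l[i]).length < l.length := by
            have h1 : (l.erase l[i]).length = l.length - 1 := List.length_erase_of_mem hm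
            have h2 : ((l.erase l[i]).erase l[i]).length ≤ (l.erase l[i]).length :=
              List.length_erase_le
            have h3 : (((l.erase l[i]).erase l[i]).erase l[i]).length ≤
                ((l.erase l[i]).erase l[i]).length := List.length_erase_le
            omega
          rw [ihn (((l.erase l[i]).erase l[i]).erase l[i]) (by omega)
            (((l.erase l[i]).erase l[i]).erase l[i]).length 0 (by omega)
            (by intro j hj hj0; omega) (kan ++ [l[i], l[i], l[i]])]
          rw [go_first l i hi hcnt hmin]
          simp [List.append_assoc]
        · rw [if_neg hcnt]
          apply ihd (i + 1) (by omega)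
          intro j hj hji
          rcases Nat.lt_succ_iff_lt_or_eq.mp hji with hlt | heq
          · exact hmin j hj hlt
          · subst heq; rw [PySem.List.count_eq] at hcnt; omega
      · rw [dif_neg hi]
        have hall : ∀ y ∈ l, List.count y l < 3 := by
          intro y hy
          obtain ⟨j, hj, hje⟩ := List.getElem_of_mem hy
          exact hje ▸ hmin j hj (by omega)
        rw [go_small l l [] hall]
        simp

-- ===== VERDICT (by name: the statement is the Claim_ definition above) =====
theorem tripletsplit_spec : Claim_equal_tripletsplit := by
  intro l _
  unfold Spec_tripletsplit tripletsplit tripletsplit_alt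
  rw [tsLoop_eq_go l.length l (le_refl _) l.length 0 (by omega) (by intro j hj h0; omega) []]
  rw [tsAltLoop_eq_go l l [] [] []]
  simp
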